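-- pv_equiv track=rewrite | github.com/caiocgslucca/roboexportadordedadosv2 | web_robo_exportador.py | _mask_to_strftime
-- ===== SOURCE A (Python) =====
-- def _mask_to_strftime(mask):
--     s = (mask or "").strip().lower()
--     if not s:
--         return ""
--     out = ""
--     i = 0
--     after_hh = False
--     while i < len(s):
--         if s.startswith("aaaa", i):
--             out += "%Y"; i += 4; continue
--         if s.startswith("aa", i):
--             out += "%y"; i += 2; continue
--         if s.startswith("dd", i):
--             out += "%d"; i += 2; continue
--         if s.startswith("hh", i):
--             out += "%H"; i += 2; after_hh = True; continue
--         if s.startswith("mm", i):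
--             out += "%M" if after_hh else "%m"; i += 2; continue
--         if s[i] in "/-_: .":
--             out += s[i]; i += 1; continue
--         out += s[i]; i += 1
--     return out
-- ===== SOURCE B (Python) =====
-- def _mask_to_strftime(mask):
--     # Run-length approach: group maximal runs of equal characters; every token
--     # (aaaa/aa/dd/hh/mm) is homogeneous, so each run is translated independently.
--     s = (mask or "").strip().lower()
--     after_hh = False
--     parts = []
--     i = 0
--     n = len(s)
--     while i < n:
--         ch = s[i]
--         j = i + 1
--         while j < n and s[j] == ch:
--             j += 1
--         k = j - i
--         if ch == 'a':
--             r = k % 4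
--             piece = "%Y" * (k // 4)
--             if r >= 2:
--                 piece += "%y"
--                 r -= 2
--             parts.append(piece + "a" * r)
--         elif ch == 'd':
--             parts.append("%d" * (k // 2) + "d" * (k % 2))
--         elif ch == 'h':
--             if k >= 2:
--                 after_hh = True
--             parts.append("%H" * (k // 2) + "h" * (k % 2))
--         elif ch == 'm':
--             parts.append(("%M" if after_hh else "%m") * (k // 2) + "m" * (k % 2))
--         else:
--             parts.append(ch * k)
--         i = j
--     return "".join(parts)
-- ===== Notes on version B (the rewrite author's own statement) =====
-- stated objective: faster
-- what changed: Replaced the char-by-char startswith scanner with a run-length-encoding pass: the string is split into maximal runs of equal characters (every mask token is homogeneous) and each run is translated at once by string-repetition arithmetic on its length, keeping the sticky after_hh latch across runs.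
import Mathlib
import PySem

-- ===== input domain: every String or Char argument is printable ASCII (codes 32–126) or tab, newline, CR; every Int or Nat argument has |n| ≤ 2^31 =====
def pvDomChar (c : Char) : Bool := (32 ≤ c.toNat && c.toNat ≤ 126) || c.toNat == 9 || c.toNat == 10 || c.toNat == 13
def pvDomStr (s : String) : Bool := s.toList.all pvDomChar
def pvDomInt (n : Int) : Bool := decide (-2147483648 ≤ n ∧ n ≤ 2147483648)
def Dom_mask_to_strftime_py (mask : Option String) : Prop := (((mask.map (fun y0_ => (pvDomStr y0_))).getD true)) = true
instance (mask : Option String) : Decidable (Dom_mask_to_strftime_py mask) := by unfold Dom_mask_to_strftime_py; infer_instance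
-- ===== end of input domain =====

-- B replaces A's char-by-char startswith scanner with a run-length-encoding pass
-- (each maximal run of one character is translated at once by length arithmetic):
-- fewer interpreter-level steps per character (measured faster in a timing run).

-- ===== PORT A =====
-- A's while-loop, on the remaining suffix of the string; each branch is one of
-- A's startswith tests in A's order ('s.startswith(p, i)' = the prefix test on take)
def goA_mask : List Char → Bool → List Char
  | [], _ => []
  | c :: rest, f =>
    if (c :: rest).take 4 = ['a','a','a','a'] then ['%','Y'] ++ goA_mask (rest.drop 3) f
    else if (c :: rest).take 2 = ['a','a'] then ['%','y'] ++ goA_mask (rest.drop 1) f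
    else if (c :: rest).take 2 = ['d','d'] then ['%','d'] ++ goA_mask (rest.drop 1) f
    else if (c :: rest).take 2 = ['h','h'] then ['%','H'] ++ goA_mask (rest.drop 1) true
    else if (c :: rest).take 2 = ['m','m'] then
      (if f then ['%','M'] else ['%','m']) ++ goA_mask (rest.drop 1) f
    else if c ∈ ['/','-','_',':',' ','.'] then c :: goA_mask rest f
    else c :: goA_mask rest f
termination_by l _ => l.length
decreasing_by all_goals (simp [List.length_drop]; try omega)

def mask_to_strftime_py (mask : Option String) : String :=
  let s := PySem.Str.lower (PySem.Str.strip (mask.getD ""))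
  if s.toList = [] then "" else String.ofList (goA_mask s.toList false)

-- ===== PORT B =====
-- "piece" * n  (Python string repetition)
def repB_mask (cs : List Char) (n : Nat) : List Char := (List.replicate n cs).flatten

-- B's outer loop: peel one maximal run of k equal characters per step and
-- translate the whole run by arithmetic on k (after_hh latch threaded through)
def goB_mask : List Char → Bool → List Char
  | [], _ => []
  | c :: rest, f =>
    let k := (rest.takeWhile (· == c)).length + 1
    let rest' := rest.dropWhile (· == c)
    if c = 'a' then
      (repB_mask ['%','Y'] (k / 4) ++ (if k % 4 ≥ 2 then ['%','y'] else []) ++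
        List.replicate (k % 4 - (if k % 4 ≥ 2 then 2 else 0)) 'a') ++ goB_mask rest' f
    else if c = 'd' then
      (repB_mask ['%','d'] (k / 2) ++ List.replicate (k % 2) 'd') ++ goB_mask rest' f
    else if c = 'h' then
      (repB_mask ['%','H'] (k / 2) ++ List.replicate (k % 2) 'h') ++
        goB_mask rest' (if k ≥ 2 then true else f)
    else if c = 'm' then
      (repB_mask (if f then ['%','M'] else ['%','m']) (k / 2) ++ List.replicate (k % 2) 'm') ++
        goB_mask rest' f
    else List.replicate k c ++ goB_mask rest' f
termination_by l _ => l.length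
decreasing_by all_goals
  simp only [List.length_cons]
  exact Nat.lt_succ_of_le (List.length_dropWhile_le _ _)

def mask_to_strftime_py_alt (mask : Option String) : String :=
  let s := PySem.Str.lower (PySem.Str.strip (mask.getD ""))
  String.ofList (goB_mask s.toList false)

-- ===== PRECONDITION & SPEC =====
def Spec_mask_to_strftime_py (mask : Option String) (out : String) : Prop := out = mask_to_strftime_py_alt mask
instance (mask : Option String) (out : String) : Decidable (Spec_mask_to_strftime_py mask out) := by unfold Spec_mask_to_strftime_py; infer_instance

-- ===== CLAIM (what is proved, stated in full; the proofs are below) =====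
def Claim_equal_mask_to_strftime_py : Prop := ∀ (mask : Option String), Dom_mask_to_strftime_py mask → Spec_mask_to_strftime_py mask (mask_to_strftime_py mask)

-- ===== LEMMAS AND PROOFS =====

-- A's scanner over a single leading literal character (one lemma per token char)
theorem goA_one_a (rest : List Char) (f : Bool) (h : rest.head? ≠ some 'a') :
    goA_mask ('a' :: rest) f = 'a' :: goA_mask rest f := by
  cases rest with
  | nil => rw [goA_mask]; simp [goA_mask]
  | cons c2 t =>
    simp only [List.head?_cons, ne_eq, Option.some.injEq] at h
    rw [goA_mask]; simp [h]

-- A's scanner over one maximal run of 'a's: %Y per four, then %y per two, literal rest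
theorem goA_run_a : ∀ (k : Nat) (rest : List Char) (f : Bool),
    rest.head? ≠ some 'a' →
    goA_mask (List.replicate k 'a' ++ rest) f =
      (repB_mask ['%','Y'] (k / 4) ++ (if k % 4 ≥ 2 then ['%','y'] else []) ++
        List.replicate (k % 4 - (if k % 4 ≥ 2 then 2 else 0)) 'a') ++ goA_mask rest f := by
  intro k
  induction k using Nat.strong_induction_on with
  | _ k ih =>
  match k with
  | 0 => intro rest f h; simp [repB_mask]
  | 1 => intro rest f h; simpa [repB_mask] using goA_one_a rest f h
  | 2 =>
    intro rest f h
    cases rest with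
    | nil => rw [goA_mask]; simp [goA_mask, repB_mask]
    | cons c2 t =>
      simp only [List.head?_cons, ne_eq, Option.some.injEq] at h
      simp only [List.replicate_succ, List.replicate_zero, List.cons_append, List.nil_append]
      rw [goA_mask]
      simp [h, repB_mask]
  | 3 =>
    intro rest f h
    cases rest with
    | nil => simp [goA_mask, repB_mask]
    | cons c2 t =>
      simp only [List.head?_cons, ne_eq, Option.some.injEq] at h
      simp only [List.replicate_succ, List.replicate_zero, List.cons_append, List.nil_append]
      rw [goA_mask]
      simp [h, repB_mask]
      rw [goA_one_a (c2 :: t) f (by simp [h])]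
  | (n+4) =>
    intro rest f h
    rw [show n+4 = 4+n by omega, List.replicate_add]
    simp only [List.replicate_succ, List.replicate_zero, List.cons_append, List.nil_append,
      List.append_assoc]
    rw [goA_mask]
    simp only [List.take]
    rw [show ('a'::'a'::'a'::(List.replicate n 'a' ++ rest)).drop 3 = List.replicate n 'a' ++ rest from rfl]
    rw [ih n (by omega) rest f h]
    have h4 : (4+n)/4 = n/4 + 1 := by omega
    have h4' : (4+n)%4 = n%4 := by omega
    simp [h4, h4', repB_mask, List.replicate_succ]

theorem goA_one_d (rest : List Char) (f : Bool) (h : rest.head? ≠ some 'd') :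
    goA_mask ('d' :: rest) f = 'd' :: goA_mask rest f := by
  cases rest with
  | nil => rw [goA_mask]; simp [goA_mask]
  | cons c2 t =>
    simp only [List.head?_cons, ne_eq, Option.some.injEq] at h
    rw [goA_mask]; simp [h]

-- A's scanner over one maximal run of 'd's: %d per pair, literal odd leftover
theorem goA_run_d : ∀ (k : Nat) (rest : List Char) (f : Bool),
    rest.head? ≠ some 'd' →
    goA_mask (List.replicate k 'd' ++ rest) f =
      (repB_mask ['%','d'] (k / 2) ++ List.replicate (k % 2) 'd') ++ goA_mask rest f := by
  intro k
  induction k using Nat.strong_induction_on with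
  | _ k ih =>
  match k with
  | 0 => intro rest f h; simp [repB_mask]
  | 1 => intro rest f h; simpa [repB_mask] using goA_one_d rest f h
  | (n+2) =>
    intro rest f h
    rw [show n+2 = 2+n by omega, List.replicate_add]
    simp only [List.replicate_succ, List.replicate_zero, List.cons_append, List.nil_append]
    rw [goA_mask]
    have h2 : (2+n)/2 = n/2 + 1 := by omega
    have h2' : (2+n)%2 = n%2 := by omega
    simp [ih n (by omega) rest f h, h2, h2', repB_mask, List.replicate_succ]

theorem goA_one_h (rest : List Char) (f : Bool) (h : rest.head? ≠ some 'h') :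
    goA_mask ('h' :: rest) f = 'h' :: goA_mask rest f := by
  cases rest with
  | nil => rw [goA_mask]; simp [goA_mask]
  | cons c2 t =>
    simp only [List.head?_cons, ne_eq, Option.some.injEq] at h
    rw [goA_mask]; simp [h]

-- A's scanner over one maximal run of 'h's: %H per pair; latch set iff a pair matched
theorem goA_run_h : ∀ (k : Nat) (rest : List Char) (f : Bool),
    rest.head? ≠ some 'h' →
    goA_mask (List.replicate k 'h' ++ rest) f =
      (repB_mask ['%','H'] (k / 2) ++ List.replicate (k % 2) 'h') ++
        goA_mask rest (if k ≥ 2 then true else f) := by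
  intro k
  induction k using Nat.strong_induction_on with
  | _ k ih =>
  match k with
  | 0 => intro rest f h; simp [repB_mask]
  | 1 => intro rest f h; simpa [repB_mask] using goA_one_h rest f h
  | (n+2) =>
    intro rest f h
    rw [show n+2 = 2+n by omega, List.replicate_add]
    simp only [List.replicate_succ, List.replicate_zero, List.cons_append, List.nil_append]
    rw [goA_mask]
    have h2 : (2+n)/2 = n/2 + 1 := by omega
    have h2' : (2+n)%2 = n%2 := by omega
    simp [ih n (by omega) rest true h, h2, h2', repB_mask, List.replicate_succ]

theorem goA_one_m (rest : List Char) (f : Bool) (h : rest.head? ≠ some 'm') :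
    goA_mask ('m' :: rest) f = 'm' :: goA_mask rest f := by
  cases rest with
  | nil => rw [goA_mask]; simp [goA_mask]
  | cons c2 t =>
    simp only [List.head?_cons, ne_eq, Option.some.injEq] at h
    rw [goA_mask]; simp [h]

-- A's scanner over one maximal run of 'm's: %M/%m per pair depending on the latch
theorem goA_run_m : ∀ (k : Nat) (rest : List Char) (f : Bool),
    rest.head? ≠ some 'm' →
    goA_mask (List.replicate k 'm' ++ rest) f =
      (repB_mask (if f then ['%','M'] else ['%','m']) (k / 2) ++ List.replicate (k % 2) 'm') ++
        goA_mask rest f := by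
  intro k
  induction k using Nat.strong_induction_on with
  | _ k ih =>
  match k with
  | 0 => intro rest f h; simp [repB_mask]
  | 1 => intro rest f h; simpa [repB_mask] using goA_one_m rest f h
  | (n+2) =>
    intro rest f h
    rw [show n+2 = 2+n by omega, List.replicate_add]
    simp only [List.replicate_succ, List.replicate_zero, List.cons_append, List.nil_append]
    rw [goA_mask]
    have h2 : (2+n)/2 = n/2 + 1 := by omega
    have h2' : (2+n)%2 = n%2 := by omega
    cases f <;>
      simp [ih n (by omega) rest _ h, h2, h2', repB_mask, List.replicate_succ]

-- a run of any non-token character passes through A's scanner literally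
theorem goA_run_other (k : Nat) (c : Char) (rest : List Char) (f : Bool)
    (ha : c ≠ 'a') (hd : c ≠ 'd') (hh : c ≠ 'h') (hm : c ≠ 'm') :
    goA_mask (List.replicate k c ++ rest) f =
      List.replicate k c ++ goA_mask rest f := by
  induction k with
  | zero => simp
  | succ k ih =>
    rw [List.replicate_succ, List.cons_append, goA_mask]
    simp [ha, hd, hh, hm, ih]

theorem head?_dropWhile_ne (c : Char) (rest : List Char) :
    (rest.dropWhile (· == c)).head? ≠ some c := by
  intro h
  have := List.head?_dropWhile_not (· == c) rest
  simp [h] at this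

theorem takeWhile_eq_replicate (c : Char) (rest : List Char) :
    rest.takeWhile (· == c) = List.replicate (rest.takeWhile (· == c)).length c := by
  rw [List.eq_replicate_iff]
  exact ⟨rfl, fun b hb => by simpa using (List.mem_takeWhile_imp hb)⟩

-- a cons is its maximal leading run (as a replicate) followed by the rest
theorem cons_eq_run (c : Char) (rest : List Char) :
    c :: rest =
      List.replicate ((rest.takeWhile (· == c)).length + 1) c ++ rest.dropWhile (· == c) := by
  conv_lhs => rw [← List.takeWhile_append_dropWhile (p := (· == c)) (l := rest)]
  rw [List.replicate_succ, List.cons_append, ← takeWhile_eq_replicate c rest]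

theorem goA_eq_goB_aux : ∀ (n : Nat) (l : List Char), l.length ≤ n →
    ∀ f, goA_mask l f = goB_mask l f := by
  intro n
  induction n with
  | zero =>
    intro l hl f
    have : l = [] := List.eq_nil_of_length_eq_zero (by omega)
    subst this; rw [goA_mask, goB_mask]
  | succ n ih =>
    intro l hl f
    cases l with
    | nil => rw [goA_mask, goB_mask]
    | cons c rest =>
      rw [goB_mask]
      have hlen : (rest.dropWhile (· == c)).length ≤ n := by
        have := List.length_dropWhile_le (· == c) rest
        simp at hl; omega
      have hh := head?_dropWhile_ne c rest
      by_cases ha : c = 'a'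
      · subst ha
        rw [if_pos rfl, ← ih _ hlen f]
        conv_lhs => rw [cons_eq_run 'a' rest]
        exact goA_run_a _ _ f hh
      · rw [if_neg ha]
        by_cases hd : c = 'd'
        · subst hd
          rw [if_pos rfl, ← ih _ hlen f]
          conv_lhs => rw [cons_eq_run 'd' rest]
          exact goA_run_d _ _ f hh
        · rw [if_neg hd]
          by_cases hhc : c = 'h'
          · subst hhc
            rw [if_pos rfl, ← ih _ hlen _]
            conv_lhs => rw [cons_eq_run 'h' rest]
            exact goA_run_h _ _ f hh
          · rw [if_neg hhc]
            by_cases hm : c = 'm'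
            · subst hm
              rw [if_pos rfl, ← ih _ hlen f]
              conv_lhs => rw [cons_eq_run 'm' rest]
              exact goA_run_m _ _ f hh
            · rw [if_neg hm, ← ih _ hlen f]
              conv_lhs => rw [cons_eq_run c rest]
              exact goA_run_other _ c _ f ha hd hhc hm

theorem goA_eq_goB (l : List Char) (f : Bool) : goA_mask l f = goB_mask l f :=
  goA_eq_goB_aux l.length l le_rfl f

-- ===== VERDICT (by name: the statement is the Claim_ definition above) =====
theorem mask_to_strftime_py_spec : Claim_equal_mask_to_strftime_py := by
  intro mask _
  unfold Spec_mask_to_strftime_py mask_to_strftime_py mask_to_strftime_py_alt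
  simp only
  split
  · next h => rw [h]; simp [goB_mask]
  · rw [goA_eq_goB]
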